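-- pv_equiv track=rewrite | github.com/cuevas46/Environmental_Programming | Landslide.py | Event_pointer
-- ===== SOURCE A (Python) =====
-- def Event_pointer(my_list):
--     Derivative = list()  # We create here the list where all the derivatives will be stored
--     for i in range(0, (len(my_list) - 1)):
--         difference = abs(my_list[i + 1][1] - my_list[i][1])
--         Derivative.append(difference)
--     index_in_dict = max(Derivative)
--     Event = Derivative.index(index_in_dict) + 1
--     Event_Average = my_list[Event][0]
--     return Event_Average
-- ===== SOURCE B (Python) =====
-- def Event_pointer(my_list):
--     # One pass: track the best (strictly greatest, first wins) consecutive
--     # absolute difference and its index; no intermediate Derivative list.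
--     best_diff = None
--     best_i = 0
--     for i in range(len(my_list) - 1):
--         d = abs(my_list[i + 1][1] - my_list[i][1])
--         if best_diff is None or d > best_diff:
--             best_diff = d
--             best_i = i
--     if best_diff is None:
--         raise ValueError("need at least two points")
--     return my_list[best_i + 1][0]
-- ===== Notes on version B (the rewrite author's own statement) =====
-- stated objective: simpler
-- what changed: Fused A's three passes (building the Derivative list, taking its maximum, then searching its first index) into a single loop that tracks the best difference and its index, eliminating the intermediate list.
import Mathlib
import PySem

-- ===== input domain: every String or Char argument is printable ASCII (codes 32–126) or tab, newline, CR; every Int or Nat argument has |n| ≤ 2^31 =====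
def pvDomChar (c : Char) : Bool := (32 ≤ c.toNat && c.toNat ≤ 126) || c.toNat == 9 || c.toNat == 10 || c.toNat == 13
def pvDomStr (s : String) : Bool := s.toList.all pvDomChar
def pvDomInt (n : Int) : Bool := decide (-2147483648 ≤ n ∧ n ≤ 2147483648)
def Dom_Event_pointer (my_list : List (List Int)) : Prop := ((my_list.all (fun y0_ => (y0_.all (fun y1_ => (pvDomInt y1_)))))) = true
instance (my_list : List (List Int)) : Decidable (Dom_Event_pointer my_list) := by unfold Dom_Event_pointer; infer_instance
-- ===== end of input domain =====

-- B fuses A's three passes (build Derivative list, max(), .index()) into one loop tracking the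
-- best strict difference and its index; equal on lists with ≥ 2 rows, each row of length ≥ 2.


-- my_list[i][1] as an Int; the IndexError case (short row / bad index) is excluded by Pre_
def pvCell (my_list : List (List Int)) (i j : Int) : Int :=
  PySem.List.pyGetD (PySem.List.pyGetD my_list i []) j 0

-- ===== PORT A =====
-- the Derivative list A builds by appending in a loop (named local of A, lifted to a helper)
def pvDerivative (my_list : List (List Int)) : List Int :=
  (PySem.List.pyRange 0 ((my_list.length : Int) - 1) 1).foldl
    (fun acc i => acc ++ [|pvCell my_list (i + 1) 1 - pvCell my_list i 1|]) []

def Event_pointer (my_list : List (List Int)) : Int :=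
  match PySem.List.max? (pvDerivative my_list) (fun x => x) with
  | none => 0  -- Python raises ValueError here (fewer than two rows); excluded by Pre_
  | some m =>
    match PySem.List.index? (pvDerivative my_list) m with
    | none => 0  -- unreachable: m ∈ Derivative
    | some e => pvCell my_list ((e : Int) + 1) 0

-- ===== PORT B =====
-- B's loop state after the for-loop: (best_diff, best_i)
def pvBState (my_list : List (List Int)) : Option Int × Int :=
  (PySem.List.pyRange 0 ((my_list.length : Int) - 1) 1).foldl
    (fun (st : Option Int × Int) i =>
      let d := |pvCell my_list (i + 1) 1 - pvCell my_list i 1|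
      match st.1 with
      | none => (some d, i)
      | some bd => if bd < d then (some d, i) else st)
    (none, 0)

def Event_pointer_alt (my_list : List (List Int)) : Int :=
  match (pvBState my_list).1 with
  | none => 0  -- Python: raise ValueError; excluded by Pre_
  | some _ => pvCell my_list ((pvBState my_list).2 + 1) 0

-- ===== PRECONDITION & SPEC =====
-- exactly where A returns: at least two rows (else taking the maximum of zero differences raises) and every row of
-- length ≥ 2 (else my_list[i][1] raises IndexError)
def Pre_Event_pointer (my_list : List (List Int)) : Prop :=
  2 ≤ my_list.length ∧ ∀ r ∈ my_list, 2 ≤ r.length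
instance (my_list : List (List Int)) : Decidable (Pre_Event_pointer my_list) := by
  unfold Pre_Event_pointer; infer_instance
def pvWitness_Event_pointer : List (List Int) := [[1, 2], [3, 7], [4, 8]]

def Spec_Event_pointer (my_list : List (List Int)) (out : Int) : Prop := out = Event_pointer_alt my_list
instance (my_list : List (List Int)) (out : Int) : Decidable (Spec_Event_pointer my_list out) := by unfold Spec_Event_pointer; infer_instance

-- ===== CLAIM (what is proved, stated in full; the proofs are below) =====
def Claim_equal_Event_pointer : Prop := ∀ (my_list : List (List Int)), Dom_Event_pointer my_list → Pre_Event_pointer my_list → Spec_Event_pointer my_list (Event_pointer my_list)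

-- ===== LEMMAS AND PROOFS =====

-- B's loop body, abstracted over the per-index difference f
def pvStep (f : Int → Int) (st : Option Int × Int) (i : Int) : Option Int × Int :=
  match st.1 with
  | none => (some (f i), i)
  | some bd => if bd < f i then (some (f i), i) else st

-- Invariant of B's loop after k ≥ 1 iterations: the state holds the maximum of the first k
-- differences together with the index of its FIRST occurrence (as index? computes it).
theorem pvStep_inv (f : Int → Int) :
    ∀ (k : Nat), 1 ≤ k →
      ∃ (b : Int) (bi : Nat),
        (PySem.List.pyRange 0 (k : Int) 1).foldl (pvStep f) (none, 0) = (some b, (bi : Int)) ∧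
        (∀ x ∈ (PySem.List.pyRange 0 (k : Int) 1).map f, x ≤ b) ∧
        PySem.List.index? ((PySem.List.pyRange 0 (k : Int) 1).map f) b = some bi := by
  intro k
  induction k with
  | zero => omega
  | succ k ih =>
    intro _
    by_cases hk : 1 ≤ k
    · obtain ⟨b, bi, hfold, hmax, hidx⟩ := ih hk
      have hsplit : PySem.List.pyRange 0 ((k : Int) + 1) 1 =
          PySem.List.pyRange 0 (k : Int) 1 ++ [(k : Int)] :=
        PySem.List.pyRange_one_succ_right (by positivity)
      have hcast : ((k + 1 : Nat) : Int) = (k : Int) + 1 := by push_cast; ring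
      rw [hcast, hsplit, List.foldl_append, hfold, List.map_append]
      have hblen : ((PySem.List.pyRange 0 (k : Int) 1).map f).length = k := by
        simp [PySem.List.length_pyRange_one]
      by_cases hlt : b < f (k : Int)
      · refine ⟨f (k : Int), k, ?_, ?_, ?_⟩
        · simp [pvStep, hlt]
        · intro x hx
          rcases List.mem_append.mp hx with hx | hx
          · exact le_of_lt (lt_of_le_of_lt (hmax x hx) hlt)
          · simp at hx; omega
        · have hnot : f (k : Int) ∉ (PySem.List.pyRange 0 (k : Int) 1).map f := by
            intro hmem
            exact absurd (hmax _ hmem) (by omega)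
          simp only [List.map_cons, List.map_nil]
          rw [PySem.List.index?_append_singleton_self _ _ hnot, hblen]
      · refine ⟨b, bi, ?_, ?_, ?_⟩
        · simp [pvStep, hlt]
        · intro x hx
          rcases List.mem_append.mp hx with hx | hx
          · exact hmax x hx
          · simp at hx; omega
        · have hb : b ∈ (PySem.List.pyRange 0 (k : Int) 1).map f :=
            (PySem.List.index?_isSome_iff _ _).mp (by rw [hidx]; rfl)
          rw [PySem.List.index?_append_of_mem _ hb]
          exact hidx
    · have hk0 : k = 0 := by omega
      subst hk0
      refine ⟨f 0, 0, ?_, ?_, ?_⟩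
      · have : PySem.List.pyRange 0 ((0 + 1 : Nat) : Int) 1 = [0] := by
          have := PySem.List.pyRange_one_singleton (a := (0 : Int))
          simpa using this
        rw [this]; simp [pvStep]
      · have : PySem.List.pyRange 0 ((0 + 1 : Nat) : Int) 1 = [0] := by
          have := PySem.List.pyRange_one_singleton (a := (0 : Int))
          simpa using this
        rw [this]; intro x hx; simp at hx; omega
      · have : PySem.List.pyRange 0 ((0 + 1 : Nat) : Int) 1 = [0] := by
          have := PySem.List.pyRange_one_singleton (a := (0 : Int))
          simpa using this
        rw [this]; simp

-- ===== VERDICT (by name: the statement is the Claim_ definition above) =====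
theorem Event_pointer_spec : Claim_equal_Event_pointer := by
  intro l _ hpre
  obtain ⟨hlen, -⟩ := hpre
  unfold Spec_Event_pointer Event_pointer Event_pointer_alt
  have hk1 : 1 ≤ l.length - 1 := by omega
  have hcast : ((l.length : Int) - 1) = ((l.length - 1 : Nat) : Int) := by omega
  obtain ⟨b, bi, hfold, hmax, hidx⟩ :=
    pvStep_inv (fun i => |pvCell l (i + 1) 1 - pvCell l i 1|) (l.length - 1) hk1
  -- B's loop body is definitionally pvStep of the difference function
  have hst : pvBState l = (some b, (bi : Int)) := by
    unfold pvBState; rw [hcast]; exact hfold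
  -- A's appending loop builds exactly the mapped difference list
  have hder : pvDerivative l = (PySem.List.pyRange 0 (((l.length - 1 : Nat)) : Int) 1).map
      (fun i => |pvCell l (i + 1) 1 - pvCell l i 1|) := by
    unfold pvDerivative
    rw [hcast]
    simpa using PySem.List.foldl_append_singleton_eq_map
      (f := fun i => |pvCell l (i + 1) 1 - pvCell l i 1|)
      (l := PySem.List.pyRange 0 (((l.length - 1 : Nat)) : Int) 1) (acc := [])
  have hb : b ∈ pvDerivative l := by
    rw [hder]
    exact (PySem.List.index?_isSome_iff _ _).mp (by rw [hidx]; rfl)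
  -- max? of the Derivative list is exactly the tracked best value b
  have hmaxD : PySem.List.max? (pvDerivative l) (fun x => x) = some b := by
    obtain ⟨m, hm⟩ : ∃ m, PySem.List.max? (pvDerivative l) (fun x => x) = some m := by
      cases hmm : PySem.List.max? (pvDerivative l) (fun x => x) with
      | none =>
        rw [(PySem.List.max?_eq_none_iff _ _).mp hmm] at hb
        exact absurd hb (by simp)
      | some m => exact ⟨m, rfl⟩
    have h1 : b ≤ m := PySem.List.max?_isMax hm b hb
    have h2 : m ≤ b := by
      have := PySem.List.max?_mem hm
      rw [hder] at this
      exact hmax m this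
    rw [hm]; congr 1; omega
  rw [hmaxD, hder, hst]
  simp only [hidx]
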